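-- pv_equiv track=rewrite | github.com/rahulsapre1/anz-conversational-ai-0 | services/response_generator.py | _detect_synthetic_content
-- ===== SOURCE A (Python) =====
-- from typing import Optional, Dict, Any, List
--
-- def _detect_synthetic_content(retrieved_chunks: List[str]) -> bool:
--     """
--     Detect if any retrieved chunks contain synthetic content.
--
--     Args:
--         retrieved_chunks: List of retrieved chunk strings
--
--     Returns:
--         True if synthetic content detected, False otherwise
--     """
--     synthetic_markers = [
--         "SYNTHETIC CONTENT",
--         "Label: SYNTHETIC",
--         "Content Type: synthetic"
--     ]
--
--     for chunk in retrieved_chunks: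
--         if any(marker in chunk for marker in synthetic_markers):
--             return True
--
--     return False
-- ===== SOURCE B (Python) =====
-- from typing import List
--
--
-- def _detect_synthetic_content(retrieved_chunks: List[str]) -> bool:
--     """Detect synthetic content by an explicit positional scan.
--
--     Walks every position of every chunk once and tests whether one of the
--     three fixed markers starts exactly there (prefix test), instead of
--     delegating to the `in` substring search per marker.
--     """
--     markers = (
--         "SYNTHETIC CONTENT",
--         "Label: SYNTHETIC",
--         "Content Type: synthetic",
--     )
--     for chunk in retrieved_chunks:
--         for i in range(len(chunk)):
--             for m in markers:
--                 if chunk.startswith(m, i):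
--                     return True
--     return False
-- ===== Notes on version B (the rewrite author's own statement) =====
-- stated objective: alternative
-- what changed: A asks the builtin substring search 'marker in chunk' per marker per chunk; B instead runs an explicit positional scan: for every index of every chunk it tests whether one of the three markers is a prefix starting at that index, so the matching machinery (position loop + prefix tests) is hand-rolled rather than delegated to 'in'.
import Mathlib
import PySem

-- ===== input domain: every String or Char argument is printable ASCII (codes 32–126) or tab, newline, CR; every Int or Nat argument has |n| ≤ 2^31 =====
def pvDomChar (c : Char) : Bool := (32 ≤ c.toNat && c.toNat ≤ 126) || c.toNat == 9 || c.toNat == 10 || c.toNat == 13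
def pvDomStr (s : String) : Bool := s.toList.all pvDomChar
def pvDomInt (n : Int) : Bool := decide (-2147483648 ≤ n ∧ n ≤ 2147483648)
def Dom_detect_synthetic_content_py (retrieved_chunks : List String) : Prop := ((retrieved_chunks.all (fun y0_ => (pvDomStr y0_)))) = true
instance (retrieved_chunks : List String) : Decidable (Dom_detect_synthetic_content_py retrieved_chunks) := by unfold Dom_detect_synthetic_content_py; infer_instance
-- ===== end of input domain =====

-- B replaces A's builtin per-marker substring search by an explicit positional scan testing marker prefixes at each index (objective: alternative).


-- ===== PORT A =====
-- the three marker literals of A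
def pvMarkers : List String :=
  ["SYNTHETIC CONTENT", "Label: SYNTHETIC", "Content Type: synthetic"]

-- for chunk in chunks: if any(marker in chunk for marker in synthetic_markers): return True; return False
def detect_synthetic_content_py (retrieved_chunks : List String) : Bool :=
  retrieved_chunks.any (fun chunk => pvMarkers.any (fun marker => PySem.Str.isIn marker chunk))

-- ===== PORT B =====
-- the three marker literals of B, as character lists (B works position-wise on characters)
def pvAltMarkers : List (List Char) :=
  ["SYNTHETIC CONTENT".toList, "Label: SYNTHETIC".toList, "Content Type: synthetic".toList]

-- inner loops: for i in range(len(chunk)): for m in markers: if chunk.startswith(m, i): return True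
-- (each loop position i corresponds to the suffix of the chunk starting at i; startswith(m, i) is the prefix test there)
def pvScanChunk : List Char → Bool
  | [] => false
  | c :: rest => pvAltMarkers.any (fun m => m.isPrefixOf (c :: rest)) || pvScanChunk rest

-- outer loop: for chunk in retrieved_chunks: … ; return False
def detect_synthetic_content_py_alt : List String → Bool
  | [] => false
  | chunk :: rest => pvScanChunk chunk.toList || detect_synthetic_content_py_alt rest

-- ===== PRECONDITION & SPEC =====
def Spec_detect_synthetic_content_py (retrieved_chunks : List String) (out : Bool) : Prop := out = detect_synthetic_content_py_alt retrieved_chunks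
instance (retrieved_chunks : List String) (out : Bool) : Decidable (Spec_detect_synthetic_content_py retrieved_chunks out) := by unfold Spec_detect_synthetic_content_py; infer_instance

-- ===== CLAIM (what is proved, stated in full; the proofs are below) =====
def Claim_equal_detect_synthetic_content_py : Prop := ∀ (retrieved_chunks : List String), Dom_detect_synthetic_content_py retrieved_chunks → Spec_detect_synthetic_content_py retrieved_chunks (detect_synthetic_content_py retrieved_chunks)

-- ===== LEMMAS AND PROOFS =====

-- B's positional scan finds exactly the chunks with some marker as an infix
-- (every marker is nonempty, so the empty suffix never matches and the base case is right).
theorem pvScanChunk_eq_true_iff (cs : List Char) :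
    pvScanChunk cs = true ↔ ∃ m ∈ pvAltMarkers, m <:+: cs := by
  induction cs with
  | nil =>
    simp only [pvScanChunk]
    constructor
    · intro h; simp at h
    · rintro ⟨m, hm, hinf⟩
      have : m = [] := List.eq_nil_of_infix_nil hinf
      subst this
      revert hm; decide
  | cons c rest ih =>
    simp only [pvScanChunk, Bool.or_eq_true, List.any_eq_true, ih]
    constructor
    · rintro (⟨m, hm, hp⟩ | ⟨m, hm, hi⟩)
      · exact ⟨m, hm, (List.isPrefixOf_iff_prefix.mp hp).isInfix⟩
      · exact ⟨m, hm, hi.trans (List.suffix_cons c rest).isInfix⟩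
    · rintro ⟨m, hm, hinf⟩
      rcases List.infix_cons_iff.mp hinf with hp | hi
      · exact Or.inl ⟨m, hm, List.isPrefixOf_iff_prefix.mpr hp⟩
      · exact Or.inr ⟨m, hm, hi⟩

-- per chunk, A's marker test agrees with B's scan
theorem pv_chunk_agree (chunk : String) :
    pvMarkers.any (fun marker => PySem.Str.isIn marker chunk) = pvScanChunk chunk.toList := by
  rw [Bool.eq_iff_iff, pvScanChunk_eq_true_iff, List.any_eq_true]
  constructor
  · rintro ⟨m, hm, hin⟩
    refine ⟨m.toList, ?_, (PySem.Str.isIn_iff_infix m chunk).mp hin⟩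
    revert hm
    simp only [pvMarkers, pvAltMarkers, List.mem_cons, List.not_mem_nil, or_false]
    rintro (rfl | rfl | rfl) <;> simp
  · rintro ⟨m, hm, hinf⟩
    simp only [pvAltMarkers, List.mem_cons, List.not_mem_nil, or_false] at hm
    rcases hm with rfl | rfl | rfl
    · exact ⟨"SYNTHETIC CONTENT", by simp [pvMarkers], (PySem.Str.isIn_iff_infix _ _).mpr hinf⟩
    · exact ⟨"Label: SYNTHETIC", by simp [pvMarkers], (PySem.Str.isIn_iff_infix _ _).mpr hinf⟩
    · exact ⟨"Content Type: synthetic", by simp [pvMarkers], (PySem.Str.isIn_iff_infix _ _).mpr hinf⟩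

-- ===== VERDICT (by name: the statement is the Claim_ definition above) =====
theorem detect_synthetic_content_py_spec : Claim_equal_detect_synthetic_content_py := by
  intro chunks hdom
  clear hdom
  unfold Spec_detect_synthetic_content_py
  induction chunks with
  | nil => simp [detect_synthetic_content_py, detect_synthetic_content_py_alt]
  | cons c rest ih =>
    simp only [detect_synthetic_content_py, List.any_cons] at ih ⊢
    rw [detect_synthetic_content_py_alt, ← ih, pv_chunk_agree]
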